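-- pv_equiv track=rewrite | github.com/aisra50/PSA_D_2023 | cavaloF.py | posCavalo
-- ===== SOURCE A (Python) =====
-- def posCavalo(entrada):
--     if len(entrada) != 5: return('erro')
--
--     linhas = ['1','2','3','4','5','6','7','8']
--     colunas = ['a','b','c','d','e','f','g','h']
--     p_final =  entrada[slice(3,5)]
--     index_l = linhas.index(entrada[1])
--     index_c = colunas.index(entrada[0])
--     v = [-2,2,-1,1]
--     l_check = []
--     c_check = []
--     pf_vlds = []
--
--     for mov in v:
--         if len(linhas) > index_l + mov and index_l + mov > -1: l_check.append(mov)
--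
--     for mov in v:
--         if len(colunas) > index_c + mov and index_c + mov > -1:  c_check.append(mov)
--
--     for linha in l_check:
--         for coluna in c_check:
--             if abs(linha) != abs(coluna):
--                 pf_vlds.append(colunas[index_c+coluna] + linhas[index_l+linha] )
--
--     if p_final in pf_vlds: return('VÁLIDO')
--     else: return('INVÁLIDO')
-- ===== SOURCE B (Python) =====
-- def posCavalo(entrada):
--     if len(entrada) != 5: return('erro')
--
--     linhas = ['1','2','3','4','5','6','7','8']
--     colunas = ['a','b','c','d','e','f','g','h']
--     index_l = linhas.index(entrada[1])
--     index_c = colunas.index(entrada[0])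
--
--     if entrada[3] not in colunas or entrada[4] not in linhas:
--         return('INVÁLIDO')
--     dc = abs(colunas.index(entrada[3]) - index_c)
--     dl = abs(linhas.index(entrada[4]) - index_l)
--     if (dc == 1 and dl == 2) or (dc == 2 and dl == 1):
--         return('VÁLIDO')
--     return('INVÁLIDO')
-- ===== Notes on version B (the rewrite author's own statement) =====
-- stated objective: simpler
-- what changed: Instead of generating the full list of legal knight destinations from the start square and testing membership, B parses the destination square directly (with a membership guard so an invalid destination still returns 'INVÁLIDO') and checks the closed-form offset condition {|dc|,|dl|} = {1,2}.
import Mathlib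
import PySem

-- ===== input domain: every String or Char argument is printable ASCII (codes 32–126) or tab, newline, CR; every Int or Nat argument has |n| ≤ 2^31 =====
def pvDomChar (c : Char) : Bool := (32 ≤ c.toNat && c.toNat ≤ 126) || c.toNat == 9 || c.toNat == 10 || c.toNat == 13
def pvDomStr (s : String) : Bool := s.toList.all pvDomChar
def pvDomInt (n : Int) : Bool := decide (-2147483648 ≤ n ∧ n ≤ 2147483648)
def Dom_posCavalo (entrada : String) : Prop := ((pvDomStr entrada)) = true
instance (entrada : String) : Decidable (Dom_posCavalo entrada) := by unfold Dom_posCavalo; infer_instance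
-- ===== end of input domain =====

-- B replaces A's generation of all legal knight destinations by a direct
-- membership-guarded parse of the destination and the offset test {|dc|,|dl|} = {1,2} (objective: simpler).

-- ===== PORT A =====
def aLinhas : List Char := ['1','2','3','4','5','6','7','8']
def aColunas : List Char := ['a','b','c','d','e','f','g','h']

-- A's three loops: l_check / c_check of feasible offsets, then the candidate squares pf_vlds
def pfVlds (index_l index_c : Nat) : List (List Char) :=
  let v : List Int := [-2, 2, -1, 1]
  let l_check : List Int := v.foldl (fun acc mov =>
    if 8 > (index_l : Int) + mov ∧ (index_l : Int) + mov > -1 then acc ++ [mov] else acc) []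
  let c_check : List Int := v.foldl (fun acc mov =>
    if 8 > (index_c : Int) + mov ∧ (index_c : Int) + mov > -1 then acc ++ [mov] else acc) []
  l_check.foldl (fun acc linha =>
    c_check.foldl (fun acc2 coluna =>
      if linha.natAbs ≠ coluna.natAbs then
        acc2 ++ [[PySem.List.pyGetD aColunas ((index_c : Int) + coluna) ' ',
                  PySem.List.pyGetD aLinhas ((index_l : Int) + linha) ' ']]
      else acc2) acc) []

def posCavaloCore (index_l index_c : Nat) (p_final : List Char) : String :=
  if p_final ∈ pfVlds index_l index_c then "VÁLIDO" else "INVÁLIDO"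

def posCavalo (entrada : String) : String :=
  let cs := entrada.toList
  if cs.length ≠ 5 then "erro"
  else
    let p_final := PySem.List.slice cs (some 3) (some 5)
    match PySem.List.index? aLinhas (PySem.List.pyGetD cs 1 ' '),
          PySem.List.index? aColunas (PySem.List.pyGetD cs 0 ' ') with
    | some index_l, some index_c => posCavaloCore index_l index_c p_final
    | _, _ => ""   -- Python raises ValueError here (invalid start square); excluded by Pre_

-- ===== PORT B =====
def bLinhas : List Char := ['1','2','3','4','5','6','7','8']
def bColunas : List Char := ['a','b','c','d','e','f','g','h']

def posCavaloAltCore (index_l index_c : Nat) (c3 c4 : Char) : String :=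
  if ¬ (c3 ∈ bColunas) ∨ ¬ (c4 ∈ bLinhas) then "INVÁLIDO"
  else
    let dc := (((PySem.List.index? bColunas c3).getD 0 : Int) - (index_c : Int)).natAbs
    let dl := (((PySem.List.index? bLinhas c4).getD 0 : Int) - (index_l : Int)).natAbs
    if (dc = 1 ∧ dl = 2) ∨ (dc = 2 ∧ dl = 1) then "VÁLIDO" else "INVÁLIDO"

def posCavalo_alt (entrada : String) : String :=
  let cs := entrada.toList
  if cs.length ≠ 5 then "erro"
  else
    match (PySem.List.index? bLinhas (PySem.List.pyGetD cs 1 ' '),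
           PySem.List.index? bColunas (PySem.List.pyGetD cs 0 ' ')) with
    | (some index_l, some index_c) =>
        posCavaloAltCore index_l index_c (PySem.List.pyGetD cs 3 ' ') (PySem.List.pyGetD cs 4 ' ')
    -- Python raises ValueError on the remaining cases (invalid start square); excluded by Pre_
    | (some _, none) => ""
    | (none, some _) => ""
    | (none, none) => ""


-- ===== PRECONDITION & SPEC =====
-- Pre_ excludes exactly the inputs where Python A raises ValueError: a length-5 input whose
-- start square (entrada[0], entrada[1]) is not a valid board square.  (B raises there too.)
def Pre_posCavalo (entrada : String) : Prop :=
  entrada.toList.length = 5 →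
    (entrada.toList.getD 0 ' ' ∈ ['a','b','c','d','e','f','g','h'] ∧
     entrada.toList.getD 1 ' ' ∈ ['1','2','3','4','5','6','7','8'])
instance (entrada : String) : Decidable (Pre_posCavalo entrada) := by
  unfold Pre_posCavalo; infer_instance

def pvWitness_posCavalo : String := "a1 b3"

def Spec_posCavalo (entrada : String) (out : String) : Prop := out = posCavalo_alt entrada
instance (entrada : String) (out : String) : Decidable (Spec_posCavalo entrada out) := by
  unfold Spec_posCavalo; infer_instance

-- ===== CLAIM (what is proved, stated in full; the proofs are below) =====
def Claim_equal_posCavalo : Prop := ∀ (entrada : String), Dom_posCavalo entrada → Pre_posCavalo entrada → Spec_posCavalo entrada (posCavalo entrada)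

-- ===== LEMMAS AND PROOFS =====

-- every candidate square A generates is a well-formed [column, row] pair
lemma pfVlds_shape : ∀ il ∈ List.range 8, ∀ ic ∈ List.range 8, ∀ p ∈ pfVlds il ic,
    p.length = 2 ∧ p.getD 0 ' ' ∈ aColunas ∧ p.getD 1 ' ' ∈ aLinhas := by decide

-- for valid start indices and a destination actually on the board, the ports agree
-- (checked by one boolean evaluation over all 8×8×8×8 cases)
def chkBoard (il ic : Nat) : Bool :=
  aColunas.all fun c3 => aLinhas.all fun c4 =>
    posCavaloCore il ic [c3, c4] == posCavaloAltCore il ic c3 c4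

lemma chkBoard_all :
    ((List.range 8).all fun il => (List.range 8).all fun ic => chkBoard il ic) = true := rfl

lemma core_agree_on_board (il ic : Nat) (hil : il < 8) (hic : ic < 8) {c3 c4 : Char}
    (h3 : c3 ∈ aColunas) (h4 : c4 ∈ aLinhas) :
    posCavaloCore il ic [c3, c4] = posCavaloAltCore il ic c3 c4 := by
  have h := chkBoard_all
  simp only [List.all_eq_true, List.mem_range] at h
  have h2 := h il hil ic hic
  simp only [chkBoard, List.all_eq_true, beq_iff_eq] at h2
  exact h2 c3 h3 c4 h4

lemma core_agree (il ic : Nat) (hil : il < 8) (hic : ic < 8) (c3 c4 : Char) :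
    posCavaloCore il ic [c3, c4] = posCavaloAltCore il ic c3 c4 := by
  by_cases h3 : c3 ∈ aColunas
  · by_cases h4 : c4 ∈ aLinhas
    · exact core_agree_on_board il ic hil hic h3 h4
    · have hA : [c3, c4] ∉ pfVlds il ic := by
        intro hmem
        have := (pfVlds_shape il (List.mem_range.mpr hil) ic (List.mem_range.mpr hic) _ hmem).2.2
        simp at this
        exact h4 this
      have h4' : ¬ (c4 ∈ bLinhas) := h4
      simp [posCavaloCore, posCavaloAltCore, hA, h4']
  · have hA : [c3, c4] ∉ pfVlds il ic := by
      intro hmem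
      have := (pfVlds_shape il (List.mem_range.mpr hil) ic (List.mem_range.mpr hic) _ hmem).2.1
      simp at this
      exact h3 this
    have h3' : ¬ (c3 ∈ bColunas) := h3
    simp [posCavaloCore, posCavaloAltCore, hA, h3']

lemma index_col (c : Char) (h : c ∈ aColunas) :
    ∃ k, PySem.List.index? aColunas c = some k ∧ k < 8 := by
  fin_cases h <;> exact ⟨_, rfl, by decide⟩

lemma index_lin (c : Char) (h : c ∈ aLinhas) :
    ∃ k, PySem.List.index? aLinhas c = some k ∧ k < 8 := by
  fin_cases h <;> exact ⟨_, rfl, by decide⟩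

lemma length_eq_five {α : Type} {xs : List α} (h : xs.length = 5) :
    ∃ a b c d e, xs = [a, b, c, d, e] := by
  match xs, h with
  | [a, b, c, d, e], _ => exact ⟨a, b, c, d, e, rfl⟩

-- ===== VERDICT (by name: the statement is the Claim_ definition above) =====
theorem posCavalo_spec : Claim_equal_posCavalo := by
  intro entrada _ hpre
  unfold Spec_posCavalo posCavalo posCavalo_alt
  by_cases h5 : entrada.toList.length = 5
  · obtain ⟨c0, c1, c2, c3, c4, hcs⟩ := length_eq_five h5
    obtain ⟨h0, h1⟩ := hpre h5
    rw [hcs] at h0 h1 ⊢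
    simp only [List.getD] at h0 h1
    obtain ⟨il, hil, hil8⟩ := index_lin c1 (by simpa [aLinhas] using h1)
    obtain ⟨ic, hic, hic8⟩ := index_col c0 (by simpa [aColunas] using h0)
    have hg1 : PySem.List.pyGetD [c0, c1, c2, c3, c4] 1 ' ' = c1 := by
      simp [PySem.List.pyGetD, PySem.List.pyGet?, PySem.List.pyIdx?]
    have hg0 : PySem.List.pyGetD [c0, c1, c2, c3, c4] 0 ' ' = c0 := by
      simp [PySem.List.pyGetD, PySem.List.pyGet?, PySem.List.pyIdx?]
    have hg3 : PySem.List.pyGetD [c0, c1, c2, c3, c4] 3 ' ' = c3 := by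
      simp [PySem.List.pyGetD, PySem.List.pyGet?, PySem.List.pyIdx?]
    have hg4 : PySem.List.pyGetD [c0, c1, c2, c3, c4] 4 ' ' = c4 := by
      simp [PySem.List.pyGetD]
    have hsl : PySem.List.slice [c0, c1, c2, c3, c4] (some 3) (some 5) = [c3, c4] := by
      simp [PySem.List.slice]
    rw [show bLinhas = aLinhas from rfl, show bColunas = aColunas from rfl]
    rw [PySem.List.index?_eq_idxOf?] at hil hic
    simp only [hg0, hg1, hg3, hg4, hsl, List.length_cons, List.length_nil]
    norm_num
    rw [hil, hic]
    exact core_agree il ic hil8 hic8 c3 c4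
  · have h5' : ¬ entrada.length = 5 := by simpa using h5
    simp [h5']
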